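-- pv_equiv track=rewrite | github.com/jcrozum/pystablemotifs | StableMotifs/DomainOfInfluence.py | single_drivers
-- ===== SOURCE A (Python) =====
-- def fixed_implies_implicant(fixed,implicant):
--     """
--     Returns True if and only if the (possibly partial) state "fixed" implies the implicant.
--     """
--     rval = True
--     for k,v in implicant.items():
--         if not k in fixed:
--             rval = False
--             break
--         elif fixed[k] != v:
--             rval = False
--             break
--     return rval
--
-- def logical_domain_of_influence(partial_state,primes,implied_hint=None,contradicted_hint=None):
--     """
--     Computes the logical domain of influence (LDOI) (see Yang et al. 2018)
--
--     INPUTS: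
--     partial_state - a dict in the PyBoolNet implicant form that define fixed nodes
--     primes - a PyBoolNet primes dictionary that define the update rules
--     implied_hint - set of states known to be a subset of the LDOI
--     contradicted_hint - set of states known to be a subset of the contradicted states
--
--     WARNING: hint states are NOT tested for consistency, as this would defeat
--     the purpose of speedup and redundancy reduction.
--
--     OUTPUTS:
--     implied - node states in the LDOI of partial_state
--     contradicted - node states that are implied by a subset of the LDOI,
--                    but contradict the node states specified by partial_state
--     Note: implied and contradicted are dictionaries in the same format as partial_state.
--     """
--
--     if implied_hint is None:
--         implied_hint = {}
--     if contradicted_hint is None: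
--         contradicted_hint = {}
--
--     fixed = partial_state.copy() # fixed will be partial_state + its LDOI
--     fixed.update(implied_hint)
--     implied = implied_hint # the LDOI
--     contradicted = contradicted_hint # states implied by partial_state that contradict partial_state
--     primes_to_search = primes.copy()
--
--     for k in implied_hint: del primes_to_search[k]
--     for k in contradicted_hint: del primes_to_search[k]
--
--     while True:
--         states_added = False
--         deletion_list = []
--         for k,v in primes_to_search.items():
--             kfixed = False
--             for i in [0,1]:
--                 if kfixed: break
--                 for p in v[i]:
--                     if kfixed: break
--                     if fixed_implies_implicant(fixed,p):
--                         kfixed = True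
--                         deletion_list.append(k)
--                         states_added = True
--                         if k in fixed:
--                             if fixed[k] == i: implied[k] = i
--                             else: contradicted[k] = i
--                         else:
--                             implied[k] = i
--                             fixed[k] = i
--         for k in set(deletion_list): del primes_to_search[k]
--         if not states_added or len(primes_to_search) == 0: break
--     return implied, contradicted
--
-- def single_drivers(partial_state,primes):
--     """
--     Finds all 1-node (logical) drivers of partial_state under the rules given by primes
--
--     Returns a list of length-1 dictionaries
--     """
--     drivers = []
--     for k in primes:
--         for val in [0,1]:
--             ds = {k:val}
--             ldoi,contra = logical_domain_of_influence(ds,primes)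
--             if all([kk in ldoi for kk in partial_state]):
--                 drivers.append(ds)
--     return drivers
-- ===== SOURCE B (Python) =====
-- def _sat(fixed, clause):
--     for x, w in clause.items():
--         if fixed.get(x) != w:
--             return False
--     return True
--
--
-- def _fire_side(fixed, clauses):
--     for i in (0, 1):
--         for p in clauses[i]:
--             if _sat(fixed, p):
--                 return i
--     return None
--
--
-- def single_drivers(partial_state, primes):
--     """
--     Finds all 1-node (logical) drivers of partial_state under the rules given by primes.
--
--     Delta-driven propagation: a variable -> dependent-rules index is built once;
--     for each candidate seed, each pass re-evaluates only the rules whose clause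
--     variables changed since their last evaluation (dirty set), instead of
--     rescanning every remaining rule every pass.
--     """
--     items = list(primes.items())
--     dep = {}
--     for name, clauses in items:
--         for side in (0, 1):
--             for p in clauses[side]:
--                 for x in p:
--                     dep.setdefault(x, set()).add(name)
--     drivers = []
--     for k in primes:
--         for val in (0, 1):
--             fixed = {k: val}
--             covered = set()
--             alive = dict(items)
--             dirty = set(alive)
--             while dirty:
--                 new_dirty = set()
--                 for name in list(alive):
--                     if name not in dirty and name not in new_dirty:
--                         continue
--                     dirty.discard(name)
--                     new_dirty.discard(name)
--                     i = _fire_side(fixed, alive[name])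
--                     if i is None:
--                         continue
--                     del alive[name]
--                     if name not in fixed:
--                         fixed[name] = i
--                         covered.add(name)
--                         new_dirty |= dep.get(name, set())
--                     elif fixed[name] == i:
--                         covered.add(name)
--                 dirty = {n for n in dirty | new_dirty if n in alive}
--             if all(kk in covered for kk in partial_state):
--                 drivers.append({k: val})
--     return drivers
-- ===== Notes on version B (the rewrite author's own statement) =====
-- stated objective: alternative
-- what changed: B builds a variable->dependent-rules index once and, per candidate seed, propagates with a dirty set so a pass evaluates only rules whose clause variables were newly fixed since their last check, instead of A's evaluation of every remaining rule every pass; B also keeps only a covered key-set instead of A's implied/contradicted dicts and deletion lists.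
-- outside the precondition, e.g. on single_drivers({}, {'a': [[{}]]}): A returns [{'a': 0}, {'a': 1}], B raises IndexError
import Mathlib
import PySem

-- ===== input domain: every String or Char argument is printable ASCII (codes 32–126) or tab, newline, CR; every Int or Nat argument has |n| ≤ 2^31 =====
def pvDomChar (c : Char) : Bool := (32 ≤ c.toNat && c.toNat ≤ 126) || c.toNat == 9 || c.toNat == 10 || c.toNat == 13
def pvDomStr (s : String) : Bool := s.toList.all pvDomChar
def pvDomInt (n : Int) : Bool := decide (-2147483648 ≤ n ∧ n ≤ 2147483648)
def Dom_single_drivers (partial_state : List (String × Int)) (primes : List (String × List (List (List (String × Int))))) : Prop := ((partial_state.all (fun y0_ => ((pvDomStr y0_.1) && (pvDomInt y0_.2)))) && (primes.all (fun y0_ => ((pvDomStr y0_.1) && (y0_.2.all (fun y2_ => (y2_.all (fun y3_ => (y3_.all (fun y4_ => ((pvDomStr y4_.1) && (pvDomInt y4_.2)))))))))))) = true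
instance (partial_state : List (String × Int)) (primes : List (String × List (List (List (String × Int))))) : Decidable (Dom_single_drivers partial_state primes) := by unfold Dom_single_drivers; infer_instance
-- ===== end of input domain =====

-- B replaces A's repeated full rescans of all remaining rules by delta-driven propagation: a
-- variable -> dependent-rules index is built once, and each pass re-evaluates only the rules
-- whose clause variables changed since their last evaluation (a dirty set); same results.

-- ===== PORT A =====
-- the rval/break loop of fixed_implies_implicant over implicant.items()
def fiiGo (fixed : PySem.Dict String Int) : List (String × Int) → Bool
  | [] => true
  | (k, v) :: rest =>
    if !fixed.contains k then false
    else if fixed.getD k 0 != v then false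
    else fiiGo fixed rest

-- implicants are Python dicts, built from the raw pair list by insertion (PySem.Dict.ofList)
def fixed_implies_implicant (fixed : PySem.Dict String Int) (implicant : List (String × Int)) : Bool :=
  fiiGo fixed (PySem.Dict.ofList implicant).items

-- 'for p in v[i]: if kfixed: break; if fixed_implies_implicant(fixed,p): kfixed = True; ...'
def scanImplicants (fixed : PySem.Dict String Int) : List (List (String × Int)) → Bool
  | [] => false
  | p :: rest => if fixed_implies_implicant fixed p then true else scanImplicants fixed rest

-- 'for i in [0,1]: if kfixed: break; for p in v[i]: ...'; v[i] raises IndexError on a too-short v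
-- in Python — such inputs are outside Pre_single_drivers, so pyGetD's [] default is never reached
def firstFire (fixed : PySem.Dict String Int) (v : List (List (List (String × Int)))) : Option Int :=
  if scanImplicants fixed (PySem.List.pyGetD v 0 []) then some 0
  else if scanImplicants fixed (PySem.List.pyGetD v 1 []) then some 1
  else none

-- one round of 'for k,v in primes_to_search.items()': returns
-- (fixed, implied, contradicted, deletion_list, states_added)
def passA (fixed implied contradicted : PySem.Dict String Int) (dels : List String) (added : Bool) :
    List (String × List (List (List (String × Int)))) →
    PySem.Dict String Int × PySem.Dict String Int × PySem.Dict String Int × List String × Bool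
  | [] => (fixed, implied, contradicted, dels, added)
  | (k, v) :: rest =>
    match firstFire fixed v with
    | none => passA fixed implied contradicted dels added rest
    | some i =>
      if fixed.contains k then
        if fixed.getD k 0 == i then
          passA fixed (implied.insert k i) contradicted (dels ++ [k]) true rest
        else
          passA fixed implied (contradicted.insert k i) (dels ++ [k]) true rest
      else
        passA (fixed.insert k i) (implied.insert k i) contradicted (dels ++ [k]) true rest

-- 'for k in set(deletion_list): del primes_to_search[k]' (deletion result is order-independent)
def delFired (dels : List String) (rem : PySem.Dict String (List (List (List (String × Int))))) :
    PySem.Dict String (List (List (List (String × Int)))) :=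
  (PySem.Set.ofList dels).foldl (fun d k => d.erase k) rem

-- the 'while True' loop of logical_domain_of_influence; Python repeats exactly when states_added
-- and the post-deletion primes_to_search is nonempty — the deleted fired keys then made it
-- strictly smaller, which the dite guard records for termination
def ldoiLoop (rem : PySem.Dict String (List (List (List (String × Int)))))
    (fixed implied contradicted : PySem.Dict String Int) :
    PySem.Dict String Int × PySem.Dict String Int :=
  if h : (passA fixed implied contradicted [] false rem.items).2.2.2.2 = true
      ∧ (delFired (passA fixed implied contradicted [] false rem.items).2.2.2.1 rem).size ≠ 0
      ∧ (delFired (passA fixed implied contradicted [] false rem.items).2.2.2.1 rem).size < rem.size then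
    ldoiLoop (delFired (passA fixed implied contradicted [] false rem.items).2.2.2.1 rem)
      (passA fixed implied contradicted [] false rem.items).1
      (passA fixed implied contradicted [] false rem.items).2.1
      (passA fixed implied contradicted [] false rem.items).2.2.1
  else ((passA fixed implied contradicted [] false rem.items).2.1,
        (passA fixed implied contradicted [] false rem.items).2.2.1)
  termination_by rem.size
  decreasing_by exact h.2.2

-- logical_domain_of_influence as single_drivers calls it (both hints None → empty dicts; the two
-- hint-deletion loops are vacuous); fixed starts as partial_state.copy()
def logical_domain_of_influence_f (partial_state : PySem.Dict String Int)
    (primes : PySem.Dict String (List (List (List (String × Int))))) :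
    PySem.Dict String Int × PySem.Dict String Int :=
  ldoiLoop primes partial_state PySem.Dict.empty PySem.Dict.empty

def single_drivers (partial_state : List (String × Int)) (primes : List (String × List (List (List (String × Int))))) : List (List (String × Int)) :=
  let psD := PySem.Dict.ofList partial_state
  let primesD := PySem.Dict.ofList primes
  primesD.keys.foldl (fun drivers k =>
    ([0, 1] : List Int).foldl (fun drivers val =>
      let ds := PySem.Dict.empty.insert k val
      let r := logical_domain_of_influence_f ds primesD
      if psD.keys.all (fun kk => r.1.contains kk) then drivers ++ [ds.items] else drivers)
      drivers) []

-- ===== PORT B =====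
-- _sat: every (x,w) of the clause dict has fixed.get(x) == w
def satClauseB (fixed : PySem.Dict String Int) (p : List (String × Int)) : Bool :=
  (PySem.Dict.ofList p).items.all (fun q => fixed.get? q.1 == some q.2)

-- _fire_side: first i in (0,1) with a satisfied clause in clauses[i] (early return);
-- clauses[i] raises IndexError on a too-short value — outside Pre_single_drivers
def fireSideB (fixed : PySem.Dict String Int) (clauses : List (List (List (String × Int)))) : Option Int :=
  if (PySem.List.pyGetD clauses 0 []).any (satClauseB fixed) then some 0
  else if (PySem.List.pyGetD clauses 1 []).any (satClauseB fixed) then some 1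
  else none

-- dep.setdefault(x, set()).add(name)
def depAddVar (name : String) (d : PySem.Dict String (PySem.Set String)) (x : String) :
    PySem.Dict String (PySem.Set String) :=
  d.insert x (PySem.Set.add (d.getD x PySem.Set.empty) name)

-- 'for x in p: dep.setdefault(x, set()).add(name)'
def depAddClause (name : String) (d : PySem.Dict String (PySem.Set String))
    (p : List (String × Int)) : PySem.Dict String (PySem.Set String) :=
  (PySem.Dict.ofList p).keys.foldl (depAddVar name) d

-- 'for side in (0, 1): for p in clauses[side]: ...'
def depAddRule (d : PySem.Dict String (PySem.Set String))
    (nc : String × List (List (List (String × Int)))) : PySem.Dict String (PySem.Set String) :=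
  ([0, 1] : List Int).foldl (fun d side => (PySem.List.pyGetD nc.2 side []).foldl (depAddClause nc.1) d) d

-- the variable -> dependent-rules index, built once from the items of the primes dict
def depIndex (items : List (String × List (List (List (String × Int))))) :
    PySem.Dict String (PySem.Set String) :=
  items.foldl depAddRule PySem.Dict.empty

-- one pass 'for name in list(alive)': state (fixed, covered, alive, dirty, new_dirty);
-- only rules in dirty | new_dirty are evaluated, the rest are skipped
def passBD (dep : PySem.Dict String (PySem.Set String)) :
    List String → PySem.Dict String Int → PySem.Set String →
    PySem.Dict String (List (List (List (String × Int)))) →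
    PySem.Set String → PySem.Set String →
    PySem.Dict String Int × PySem.Set String ×
      PySem.Dict String (List (List (List (String × Int)))) × PySem.Set String × PySem.Set String
  | [], fixed, covered, alive, dirty, nd => (fixed, covered, alive, dirty, nd)
  | name :: rest, fixed, covered, alive, dirty, nd =>
    if !(PySem.Set.contains dirty name) && !(PySem.Set.contains nd name) then
      passBD dep rest fixed covered alive dirty nd
    else
      match fireSideB fixed (alive.getD name []) with
      | none => passBD dep rest fixed covered alive (dirty.discard name) (nd.discard name)
      | some i =>
        if !(fixed.contains name) then
          passBD dep rest (fixed.insert name i) (PySem.Set.add covered name) (alive.erase name)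
            (dirty.discard name) ((nd.discard name).union (dep.getD name PySem.Set.empty))
        else if fixed.getD name 0 == i then
          passBD dep rest fixed (PySem.Set.add covered name) (alive.erase name)
            (dirty.discard name) (nd.discard name)
        else
          passBD dep rest fixed covered (alive.erase name)
            (dirty.discard name) (nd.discard name)

-- 'while dirty:' — run a pass over the snapshot of alive's keys, then
-- dirty = {n for n in dirty | new_dirty if n in alive}; returns covered
def loopB (dep : PySem.Dict String (PySem.Set String)) (fixed : PySem.Dict String Int)
    (covered : PySem.Set String)
    (alive : PySem.Dict String (List (List (List (String × Int)))))
    (dirty : PySem.Set String) : PySem.Set String :=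
  if dirty.isEmpty then covered
  else
    if h : (passBD dep alive.keys fixed covered alive dirty PySem.Set.empty).2.2.1.size < alive.size then
      loopB dep (passBD dep alive.keys fixed covered alive dirty PySem.Set.empty).1
        (passBD dep alive.keys fixed covered alive dirty PySem.Set.empty).2.1
        (passBD dep alive.keys fixed covered alive dirty PySem.Set.empty).2.2.1
        (((passBD dep alive.keys fixed covered alive dirty PySem.Set.empty).2.2.2.1.union
            (passBD dep alive.keys fixed covered alive dirty PySem.Set.empty).2.2.2.2).filter
          (fun n => (passBD dep alive.keys fixed covered alive dirty PySem.Set.empty).2.2.1.contains n))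
    else (passBD dep alive.keys fixed covered alive dirty PySem.Set.empty).2.1
  termination_by alive.size
  decreasing_by exact h

def single_drivers_alt (partial_state : List (String × Int)) (primes : List (String × List (List (List (String × Int))))) : List (List (String × Int)) :=
  let psD := PySem.Dict.ofList partial_state
  let primesD := PySem.Dict.ofList primes
  let dep := depIndex primesD.items
  primesD.keys.foldl (fun drivers k =>
    ([0, 1] : List Int).foldl (fun drivers val =>
      if psD.keys.all (fun kk =>
          PySem.Set.contains
            (loopB dep (PySem.Dict.empty.insert k val) PySem.Set.empty
              (PySem.Dict.ofList primesD.items)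
              (PySem.Set.ofList (PySem.Dict.ofList primesD.items).keys)) kk)
      then drivers ++ [[(k, val)]] else drivers) drivers) []

-- ===== PRECONDITION & SPEC =====
-- Python indexes v[0] and v[1] of every rule value; Pre_ requires every rule (after dict
-- collapse of duplicate keys) to carry both prime lists (length ≥ 2). This excludes inputs where
-- A raises IndexError, and — stated in the claim's cites — the inputs where a too-short value is
-- masked because an earlier implicant of the same rule fires first (A then still returns, while
-- B raises while building its index).
def Pre_single_drivers (partial_state : List (String × Int)) (primes : List (String × List (List (List (String × Int))))) : Prop :=
  ∀ v ∈ (PySem.Dict.ofList primes).values, 2 ≤ v.length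
instance (partial_state : List (String × Int)) (primes : List (String × List (List (List (String × Int))))) : Decidable (Pre_single_drivers partial_state primes) := by unfold Pre_single_drivers; infer_instance

def pvWitness_single_drivers : (List (String × Int)) × (List (String × List (List (List (String × Int))))) :=
  ([("x", 1)], [("x", [[], [[("x", 1)]]]), ("y", [[[("x", 1)]], []])])

def Spec_single_drivers (partial_state : List (String × Int)) (primes : List (String × List (List (List (String × Int))))) (out : List (List (String × Int))) : Prop := out = single_drivers_alt partial_state primes
instance (partial_state : List (String × Int)) (primes : List (String × List (List (List (String × Int))))) (out : List (List (String × Int))) : Decidable (Spec_single_drivers partial_state primes out) := by unfold Spec_single_drivers; infer_instance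

-- ===== CLAIM (what is proved, stated in full; the proofs are below) =====
def Claim_equal_single_drivers : Prop := ∀ (partial_state : List (String × Int)) (primes : List (String × List (List (List (String × Int))))), Dom_single_drivers partial_state primes → Pre_single_drivers partial_state primes → Spec_single_drivers partial_state primes (single_drivers partial_state primes)

-- ===== LEMMAS AND PROOFS =====

-- the variables mentioned in a rule's clauses (proof-side notion only)
def varsOf (c : List (List (List (String × Int)))) : List String :=
  ((PySem.List.pyGetD c 0 []) ++ (PySem.List.pyGetD c 1 [])).flatMap
    (fun p => (PySem.Dict.ofList p).keys)

theorem fiiGo_eq_all (fixed : PySem.Dict String Int) (l : List (String × Int)) :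
    fiiGo fixed l = l.all (fun q => fixed.get? q.1 == some q.2) := by
  induction l with
  | nil => rfl
  | cons q rest ih =>
    obtain ⟨k, v⟩ := q
    simp only [fiiGo, List.all_cons, ← ih]
    cases hg : fixed.get? k with
    | none =>
      have hc : fixed.contains k = false := by
        rw [PySem.Dict.contains_eq_isSome_get?, hg]; rfl
      simp [hc, hg]
    | some w =>
      have hc : fixed.contains k = true := by
        rw [PySem.Dict.contains_eq_isSome_get?, hg]; rfl
      have hd : fixed.getD k 0 = w := by rw [PySem.Dict.getD_eq_get?_getD, hg]; rfl
      by_cases hw : w = v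
      · subst hw; simp [hc, hd, hg]
      · simp [hc, hd, hg, hw]

theorem fii_eq_satClauseB (fixed : PySem.Dict String Int) (p : List (String × Int)) :
    fixed_implies_implicant fixed p = satClauseB fixed p := by
  unfold fixed_implies_implicant satClauseB
  rw [fiiGo_eq_all]

theorem scanImplicants_eq_any (fixed : PySem.Dict String Int) (l : List (List (String × Int))) :
    scanImplicants fixed l = l.any (fun p => satClauseB fixed p) := by
  induction l with
  | nil => rfl
  | cons p rest ih =>
    simp only [scanImplicants, List.any_cons, fii_eq_satClauseB, ih]
    cases h : satClauseB fixed p <;> simp [h]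

theorem firstFire_eq_fireSideB (fixed : PySem.Dict String Int)
    (v : List (List (List (String × Int)))) : firstFire fixed v = fireSideB fixed v := by
  unfold firstFire fireSideB
  rw [scanImplicants_eq_any, scanImplicants_eq_any]

theorem all_congr_mem' {α : Type} (l : List α) (f g : α → Bool) (h : ∀ x ∈ l, f x = g x) :
    l.all f = l.all g := by
  rw [List.all_eq_not_any_not, List.all_eq_not_any_not,
    PySem.List.any_congr_mem (fun x hx => by rw [h x hx])]

theorem set_contains_add (s : PySem.Set String) (m x : String) :
    PySem.Set.contains (PySem.Set.add s m) x = (x == m || PySem.Set.contains s x) := by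
  rw [PySem.Set.add_eq_ite]
  by_cases hm : m ∈ s
  · rw [if_pos hm]
    by_cases hx : x = m
    · subst hx; simp [PySem.Set.contains, List.contains_eq_mem, hm]
    · simp [hx]
  · rw [if_neg hm]
    by_cases hx : x = m
    · subst hx; simp [PySem.Set.contains, List.contains_eq_mem]
    · simp [PySem.Set.contains, List.contains_eq_mem, hx]

theorem set_contains_discard (s : PySem.Set String) (k x : String) :
    PySem.Set.contains (PySem.Set.discard s k) x = (!(x == k) && PySem.Set.contains s x) := by
  simp only [PySem.Set.contains, PySem.Set.discard, List.contains_eq_mem, List.mem_filter]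
  by_cases hk : x = k <;> by_cases hs : x ∈ s <;> simp [hk, hs]

theorem set_contains_union (s t : PySem.Set String) (x : String) :
    PySem.Set.contains (PySem.Set.union s t) x
      = (PySem.Set.contains s x || PySem.Set.contains t x) := by
  simp only [PySem.Set.contains, List.contains_eq_mem]
  by_cases hs : x ∈ s <;> by_cases ht : x ∈ t <;>
    simp [PySem.Set.mem_union, hs, ht]

theorem find?_filter_ne {β : Type} (l : List (String × β)) (k x : String) (h : x ≠ k) :
    (l.filter (fun p => !(p.1 == k))).find? (fun p => p.1 == x)
      = l.find? (fun p => p.1 == x) := by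
  induction l with
  | nil => rfl
  | cons p t ih =>
    by_cases hp : p.1 = k
    · rw [List.filter_cons, if_neg (by simp [hp]), List.find?_cons, ih]
      have hne : (p.1 == x) = false := by
        simp only [beq_eq_false_iff_ne, hp]
        exact fun he => h he.symm
      simp [hne]
    · rw [List.filter_cons, if_pos (by simp [hp]), List.find?_cons, List.find?_cons]
      cases hpx : (p.1 == x) with
      | true => simp [hpx]
      | false => simp only [hpx, cond_false, ih]

theorem items_erase {β : Type} (d : PySem.Dict String β) (k : String) :
    (d.erase k).items = d.items.filter (fun p => !(p.1 == k)) := rfl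

theorem get?_erase_of_ne {β : Type} (d : PySem.Dict String β) (k x : String) (h : x ≠ k) :
    (d.erase k).get? x = d.get? x := by
  show ((d.items.filter (fun p => !(p.1 == k))).find? (fun p => p.1 == x)).map (fun p => p.2)
      = (d.items.find? (fun p => p.1 == x)).map (fun p => p.2)
  rw [find?_filter_ne _ _ _ h]

theorem mem_items_erase {β : Type} (d : PySem.Dict String β) (k : String) (p : String × β)
    (h : p ∈ (d.erase k).items) : p ∈ d.items ∧ p.1 ≠ k := by
  rw [items_erase, List.mem_filter] at h
  exact ⟨h.1, by simpa using h.2⟩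

theorem keys_erase_nodup {β : Type} (d : PySem.Dict String β) (k : String)
    (h : d.keys.Nodup) : (d.erase k).keys.Nodup := by
  show ((d.items.filter (fun p => !(p.1 == k))).map (fun x => x.1)).Nodup
  exact List.Nodup.sublist (List.Sublist.map _ List.filter_sublist) h

theorem satClauseB_insert (fixed : PySem.Dict String Int) (m : String) (i : Int)
    (p : List (String × Int)) (h : m ∉ (PySem.Dict.ofList p).keys) :
    satClauseB (fixed.insert m i) p = satClauseB fixed p := by
  unfold satClauseB
  apply all_congr_mem'
  intro q hq
  have hne : q.1 ≠ m := fun he => h (he ▸ PySem.Dict.mem_keys_of_mem_items _ hq)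
  rw [PySem.Dict.get?_insert_of_ne _ _ hne]

theorem fireSideB_insert (fixed : PySem.Dict String Int) (m : String) (i : Int)
    (c : List (List (List (String × Int)))) (h : m ∉ varsOf c) :
    fireSideB (fixed.insert m i) c = fireSideB fixed c := by
  have hside : ∀ (s : List (List (String × Int))),
      (∀ p ∈ s, p ∈ PySem.List.pyGetD c 0 [] ++ PySem.List.pyGetD c 1 []) →
      s.any (satClauseB (fixed.insert m i)) = s.any (satClauseB fixed) := by
    intro s hs
    apply PySem.List.any_congr_mem
    intro p hp
    apply satClauseB_insert
    intro hm
    exact h (List.mem_flatMap.mpr ⟨p, hs p hp, hm⟩)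
  unfold fireSideB
  rw [hside _ (fun p hp => List.mem_append.mpr (Or.inl hp)),
    hside _ (fun p hp => List.mem_append.mpr (Or.inr hp))]

-- ===== dep-index soundness =====

theorem depAddVar_pres (name : String) (d : PySem.Dict String (PySem.Set String))
    (x y n : String) (h : PySem.Set.contains (d.getD y PySem.Set.empty) n = true) :
    PySem.Set.contains ((depAddVar name d x).getD y PySem.Set.empty) n = true := by
  unfold depAddVar
  rw [PySem.Dict.getD_insert]
  split
  · next he =>
    subst he
    rw [set_contains_add]
    rw [h]
    simp
  · exact h

theorem depAddVar_self (name : String) (d : PySem.Dict String (PySem.Set String)) (x : String) :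
    PySem.Set.contains ((depAddVar name d x).getD x PySem.Set.empty) name = true := by
  unfold depAddVar
  rw [PySem.Dict.getD_insert_self, set_contains_add]
  simp

theorem foldl_depAddVar_pres (name : String) (L : List String)
    (d : PySem.Dict String (PySem.Set String)) (y n : String)
    (h : PySem.Set.contains (d.getD y PySem.Set.empty) n = true) :
    PySem.Set.contains ((L.foldl (depAddVar name) d).getD y PySem.Set.empty) n = true := by
  induction L generalizing d with
  | nil => exact h
  | cons a t ih => exact ih _ (depAddVar_pres name d a y n h)

theorem foldl_depAddVar_mem (name : String) (L : List String)
    (d : PySem.Dict String (PySem.Set String)) (x : String) (hx : x ∈ L) :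
    PySem.Set.contains ((L.foldl (depAddVar name) d).getD x PySem.Set.empty) name = true := by
  induction L generalizing d with
  | nil => cases hx
  | cons a t ih =>
    rcases List.mem_cons.mp hx with rfl | hxt
    · exact foldl_depAddVar_pres name t _ x name (depAddVar_self name d x)
    · exact ih _ hxt

theorem depAddClause_pres (name : String) (d : PySem.Dict String (PySem.Set String))
    (p : List (String × Int)) (y n : String)
    (h : PySem.Set.contains (d.getD y PySem.Set.empty) n = true) :
    PySem.Set.contains ((depAddClause name d p).getD y PySem.Set.empty) n = true :=
  foldl_depAddVar_pres name _ d y n h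

theorem foldl_depAddClause_pres (name : String) (L : List (List (String × Int)))
    (d : PySem.Dict String (PySem.Set String)) (y n : String)
    (h : PySem.Set.contains (d.getD y PySem.Set.empty) n = true) :
    PySem.Set.contains ((L.foldl (depAddClause name) d).getD y PySem.Set.empty) n = true := by
  induction L generalizing d with
  | nil => exact h
  | cons p t ih => exact ih _ (depAddClause_pres name d p y n h)

theorem foldl_depAddClause_mem (name : String) (L : List (List (String × Int)))
    (d : PySem.Dict String (PySem.Set String)) (p : List (String × Int)) (x : String)
    (hp : p ∈ L) (hx : x ∈ (PySem.Dict.ofList p).keys) :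
    PySem.Set.contains ((L.foldl (depAddClause name) d).getD x PySem.Set.empty) name = true := by
  induction L generalizing d with
  | nil => cases hp
  | cons q t ih =>
    rcases List.mem_cons.mp hp with rfl | hpt
    · exact foldl_depAddClause_pres name t _ x name (foldl_depAddVar_mem name _ d x hx)
    · exact ih _ hpt

theorem depAddRule_eq (d : PySem.Dict String (PySem.Set String))
    (nc : String × List (List (List (String × Int)))) :
    depAddRule d nc = (PySem.List.pyGetD nc.2 1 []).foldl (depAddClause nc.1)
      ((PySem.List.pyGetD nc.2 0 []).foldl (depAddClause nc.1) d) := rfl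

theorem depAddRule_pres (d : PySem.Dict String (PySem.Set String))
    (nc : String × List (List (List (String × Int)))) (y n : String)
    (h : PySem.Set.contains (d.getD y PySem.Set.empty) n = true) :
    PySem.Set.contains ((depAddRule d nc).getD y PySem.Set.empty) n = true := by
  rw [depAddRule_eq]
  exact foldl_depAddClause_pres _ _ _ y n (foldl_depAddClause_pres _ _ _ y n h)

theorem depAddRule_sound (d : PySem.Dict String (PySem.Set String))
    (nc : String × List (List (List (String × Int)))) (x : String) (hx : x ∈ varsOf nc.2) :
    PySem.Set.contains ((depAddRule d nc).getD x PySem.Set.empty) nc.1 = true := by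
  rw [depAddRule_eq]
  obtain ⟨p, hp, hxk⟩ := List.mem_flatMap.mp hx
  rcases List.mem_append.mp hp with hp0 | hp1
  · exact foldl_depAddClause_pres _ _ _ x _ (foldl_depAddClause_mem _ _ _ p x hp0 hxk)
  · exact foldl_depAddClause_mem _ _ _ p x hp1 hxk

theorem foldl_depAddRule_pres (items : List (String × List (List (List (String × Int)))))
    (d : PySem.Dict String (PySem.Set String)) (y n : String)
    (h : PySem.Set.contains (d.getD y PySem.Set.empty) n = true) :
    PySem.Set.contains ((items.foldl depAddRule d).getD y PySem.Set.empty) n = true := by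
  induction items generalizing d with
  | nil => exact h
  | cons nc t ih => exact ih _ (depAddRule_pres d nc y n h)

theorem foldl_depAddRule_sound (items : List (String × List (List (List (String × Int)))))
    (d : PySem.Dict String (PySem.Set String)) (p : String × List (List (List (String × Int))))
    (hp : p ∈ items) (x : String) (hx : x ∈ varsOf p.2) :
    PySem.Set.contains ((items.foldl depAddRule d).getD x PySem.Set.empty) p.1 = true := by
  induction items generalizing d with
  | nil => cases hp
  | cons nc t ih =>
    rcases List.mem_cons.mp hp with rfl | hpt
    · exact foldl_depAddRule_pres t _ x p.1 (depAddRule_sound d p x hx)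
    · exact ih _ hpt

theorem depIndex_sound (items : List (String × List (List (List (String × Int)))))
    (p : String × List (List (List (String × Int)))) (hp : p ∈ items) (x : String)
    (hx : x ∈ varsOf p.2) :
    PySem.Set.contains ((depIndex items).getD x PySem.Set.empty) p.1 = true :=
  foldl_depAddRule_sound items PySem.Dict.empty p hp x hx

theorem passA_noop (rem : List (String × List (List (List (String × Int)))))
    (fixed implied contra : PySem.Dict String Int) (dels : List String) (added : Bool)
    (h : ∀ p ∈ rem, firstFire fixed p.2 = none) :
    passA fixed implied contra dels added rem = (fixed, implied, contra, dels, added) := by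
  induction rem with
  | nil => rfl
  | cons e rest ih =>
    obtain ⟨k, v⟩ := e
    simp only [passA]
    rw [h (k, v) List.mem_cons_self]
    exact ih (fun p hp => h p (List.mem_cons_of_mem _ hp))

theorem eraseFold_items (L : List String)
    (d : PySem.Dict String (List (List (List (String × Int))))) :
    (L.foldl (fun d k => d.erase k) d).items = d.items.filter (fun p => !(L.contains p.1)) := by
  induction L generalizing d with
  | nil => simp
  | cons k L ih =>
    rw [List.foldl_cons, ih, items_erase, List.filter_filter]
    apply List.filter_congr
    intro e _
    simp only [List.contains_cons, Bool.not_or]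
    rw [Bool.and_comm]

theorem pass_spec (rem : List (String × List (List (List (String × Int)))))
    (fixed implied contra : PySem.Dict String Int) (covered : PySem.Set String)
    (alive : PySem.Dict String (List (List (List (String × Int)))))
    (dirty nd : PySem.Set String) (dels : List String) (added : Bool)
    (dep : PySem.Dict String (PySem.Set String))
    (hcov : ∀ x, implied.contains x = PySem.Set.contains covered x)
    (hget : ∀ p ∈ rem, alive.get? p.1 = some p.2)
    (hndr : (rem.map Prod.fst).Nodup)
    (hkeys : alive.keys.Nodup)
    (hclean : ∀ p ∈ alive.items,
      (PySem.Set.contains dirty p.1 || PySem.Set.contains nd p.1) = false →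
      fireSideB fixed p.2 = none)
    (hdep : ∀ p ∈ alive.items, ∀ x ∈ varsOf p.2,
      PySem.Set.contains (dep.getD x PySem.Set.empty) p.1 = true) :
    ∃ fired : List String,
      (passA fixed implied contra dels added rem).1
        = (passBD dep (rem.map Prod.fst) fixed covered alive dirty nd).1
      ∧ (∀ x, (passA fixed implied contra dels added rem).2.1.contains x
            = PySem.Set.contains (passBD dep (rem.map Prod.fst) fixed covered alive dirty nd).2.1 x)
      ∧ (passA fixed implied contra dels added rem).2.2.2.1 = dels ++ fired
      ∧ (passA fixed implied contra dels added rem).2.2.2.2 = (added || !fired.isEmpty)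
      ∧ (passBD dep (rem.map Prod.fst) fixed covered alive dirty nd).2.2.1.items
          = alive.items.filter (fun p => !(fired.contains p.1))
      ∧ (∀ x ∈ fired, x ∈ rem.map Prod.fst)
      ∧ (∀ p ∈ (passBD dep (rem.map Prod.fst) fixed covered alive dirty nd).2.2.1.items,
          (PySem.Set.contains
              (passBD dep (rem.map Prod.fst) fixed covered alive dirty nd).2.2.2.1 p.1
            || PySem.Set.contains
              (passBD dep (rem.map Prod.fst) fixed covered alive dirty nd).2.2.2.2 p.1) = false →
          fireSideB (passBD dep (rem.map Prod.fst) fixed covered alive dirty nd).1 p.2 = none) := by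
  induction rem generalizing fixed implied contra covered alive dirty nd dels added with
  | nil =>
    refine ⟨[], rfl, hcov, by simp [passA], by simp [passA], by simp [passBD], by simp, ?_⟩
    intro p hp h0
    exact hclean p hp h0
  | cons e rest ih =>
    obtain ⟨k, v⟩ := e
    have hkv : (k, v) ∈ alive.items :=
      (PySem.Dict.get?_eq_some_iff_mem_items _ _ _ hkeys).mp (hget (k, v) List.mem_cons_self)
    have hknotin : k ∉ rest.map Prod.fst := by
      simp only [List.map_cons, List.nodup_cons] at hndr; exact hndr.1
    have hndr' : (rest.map Prod.fst).Nodup := by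
      simp only [List.map_cons, List.nodup_cons] at hndr; exact hndr.2
    have hrestne : ∀ p ∈ rest, p.1 ≠ k := by
      intro p hp he
      exact hknotin (he ▸ List.mem_map_of_mem hp)
    simp only [passA, passBD, List.map_cons]
    rw [firstFire_eq_fireSideB]
    by_cases hkd : (PySem.Set.contains dirty k || PySem.Set.contains nd k) = true
    · -- the rule is dirty: B evaluates it, like A
      have hcondF : ¬((!PySem.Set.contains dirty k && !PySem.Set.contains nd k) = true) := by
        simp only [Bool.and_eq_true, Bool.not_eq_true']
        rintro ⟨h1, h2⟩
        rw [h1, h2] at hkd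
        exact absurd hkd (by simp)
      rw [if_neg hcondF]
      have hgd : alive.getD k [] = v :=
        PySem.Dict.getD_of_get?_eq_some _ _ (hget (k, v) List.mem_cons_self)
      rw [hgd]
      cases hf : fireSideB fixed v with
      | none =>
        dsimp only
        have hclean' : ∀ p ∈ alive.items,
            (PySem.Set.contains (dirty.discard k) p.1
              || PySem.Set.contains (nd.discard k) p.1) = false →
            fireSideB fixed p.2 = none := by
          intro p hp h0
          by_cases hpk : p.1 = k
          · have hv2 : p.2 = v := by
              have h2 := PySem.Dict.get?_of_mem_items _ hp hkeys
              rw [hpk, hget (k, v) List.mem_cons_self] at h2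
              exact (Option.some.injEq _ _).mp h2.symm
            rw [hv2]; exact hf
          · have hbk : (p.1 == k) = false := beq_eq_false_iff_ne.mpr hpk
            rw [set_contains_discard, set_contains_discard, hbk] at h0
            simp only [Bool.not_false, Bool.true_and] at h0
            exact hclean p hp h0
        obtain ⟨fired, i1, i2, i3, i4, i5, i6, i7⟩ :=
          ih fixed implied contra covered alive (dirty.discard k) (nd.discard k) dels added
            hcov (fun p hp => hget p (List.mem_cons_of_mem _ hp)) hndr' hkeys hclean' hdep
        exact ⟨fired, i1, i2, i3, i4, i5, fun x hx => List.mem_cons_of_mem _ (i6 x hx), i7⟩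
      | some i =>
        dsimp only
        -- common facts about alive.erase k
        have hget' : ∀ p ∈ rest, (alive.erase k).get? p.1 = some p.2 := by
          intro p hp
          rw [get?_erase_of_ne _ _ _ (hrestne p hp)]
          exact hget p (List.mem_cons_of_mem _ hp)
        have hkeys' := keys_erase_nodup alive k hkeys
        have hdep' : ∀ p ∈ (alive.erase k).items, ∀ x ∈ varsOf p.2,
            PySem.Set.contains (dep.getD x PySem.Set.empty) p.1 = true := by
          intro p hp x hx
          exact hdep p (mem_items_erase _ _ _ hp).1 x hx
        have filterstep : ∀ fired : List String,
            (alive.erase k).items.filter (fun p => !(fired.contains p.1))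
              = alive.items.filter (fun p => !((k :: fired).contains p.1)) := by
          intro fired
          rw [items_erase, List.filter_filter]
          apply List.filter_congr
          intro a _
          simp only [List.contains_cons, Bool.not_or]
          rw [Bool.and_comm]
        by_cases hc : fixed.contains k = true
        · have hnb : ¬((!fixed.contains k) = true) := by simp [hc]
          by_cases hv : (fixed.getD k 0 == i) = true
          · rw [if_pos hc, if_pos hv, if_neg hnb, if_pos hv]
            have hcov' : ∀ x, (implied.insert k i).contains x
                = PySem.Set.contains (PySem.Set.add covered k) x := by
              intro x
              rw [PySem.Dict.contains_insert, set_contains_add, hcov x]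
            have hclean' : ∀ p ∈ (alive.erase k).items,
                (PySem.Set.contains (dirty.discard k) p.1
                  || PySem.Set.contains (nd.discard k) p.1) = false →
                fireSideB fixed p.2 = none := by
              intro p hp h0
              obtain ⟨hpi, hpk⟩ := mem_items_erase _ _ _ hp
              have hbk : (p.1 == k) = false := beq_eq_false_iff_ne.mpr hpk
              rw [set_contains_discard, set_contains_discard, hbk] at h0
              simp only [Bool.not_false, Bool.true_and] at h0
              exact hclean p hpi h0
            obtain ⟨fired, i1, i2, i3, i4, i5, i6, i7⟩ :=
              ih fixed (implied.insert k i) contra (PySem.Set.add covered k) (alive.erase k)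
                (dirty.discard k) (nd.discard k) (dels ++ [k]) true
                hcov' hget' hndr' hkeys' hclean' hdep'
            refine ⟨k :: fired, i1, i2, ?_, ?_, ?_, ?_, i7⟩
            · rw [i3, List.append_assoc]; rfl
            · rw [i4]; simp
            · rw [i5, filterstep]
            · intro x hx
              rcases List.mem_cons.mp hx with rfl | hx
              · exact List.mem_cons_self
              · exact List.mem_cons_of_mem _ (i6 x hx)
          · rw [if_pos hc, if_neg hv, if_neg hnb, if_neg hv]
            have hclean' : ∀ p ∈ (alive.erase k).items,
                (PySem.Set.contains (dirty.discard k) p.1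
                  || PySem.Set.contains (nd.discard k) p.1) = false →
                fireSideB fixed p.2 = none := by
              intro p hp h0
              obtain ⟨hpi, hpk⟩ := mem_items_erase _ _ _ hp
              have hbk : (p.1 == k) = false := beq_eq_false_iff_ne.mpr hpk
              rw [set_contains_discard, set_contains_discard, hbk] at h0
              simp only [Bool.not_false, Bool.true_and] at h0
              exact hclean p hpi h0
            obtain ⟨fired, i1, i2, i3, i4, i5, i6, i7⟩ :=
              ih fixed implied (contra.insert k i) covered (alive.erase k)
                (dirty.discard k) (nd.discard k) (dels ++ [k]) true
                hcov hget' hndr' hkeys' hclean' hdep'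
            refine ⟨k :: fired, i1, i2, ?_, ?_, ?_, ?_, i7⟩
            · rw [i3, List.append_assoc]; rfl
            · rw [i4]; simp
            · rw [i5, filterstep]
            · intro x hx
              rcases List.mem_cons.mp hx with rfl | hx
              · exact List.mem_cons_self
              · exact List.mem_cons_of_mem _ (i6 x hx)
        · have hnc : ¬(fixed.contains k = true) := by simp [hc]
          have hb : (!fixed.contains k) = true := by simp [Bool.not_eq_true] at hc; simp [hc]
          rw [if_neg hnc, if_pos hb]
          have hcov' : ∀ x, (implied.insert k i).contains x
              = PySem.Set.contains (PySem.Set.add covered k) x := by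
            intro x
            rw [PySem.Dict.contains_insert, set_contains_add, hcov x]
          have hclean' : ∀ p ∈ (alive.erase k).items,
              (PySem.Set.contains (dirty.discard k) p.1
                || PySem.Set.contains
                    ((nd.discard k).union (dep.getD k PySem.Set.empty)) p.1) = false →
              fireSideB (fixed.insert k i) p.2 = none := by
            intro p hp h0
            obtain ⟨hpi, hpk⟩ := mem_items_erase _ _ _ hp
            have hbk : (p.1 == k) = false := beq_eq_false_iff_ne.mpr hpk
            rw [set_contains_discard, set_contains_union, set_contains_discard, hbk] at h0
            simp only [Bool.not_false, Bool.true_and, Bool.or_eq_false_iff] at h0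
            obtain ⟨hdirty0, hnd0, hdep0⟩ := h0
            have hkvars : k ∉ varsOf p.2 := by
              intro hkv2
              rw [hdep p hpi k hkv2] at hdep0
              exact absurd hdep0 (by simp)
            rw [fireSideB_insert _ _ _ _ hkvars]
            exact hclean p hpi (by rw [hdirty0, hnd0]; rfl)
          obtain ⟨fired, i1, i2, i3, i4, i5, i6, i7⟩ :=
            ih (fixed.insert k i) (implied.insert k i) contra (PySem.Set.add covered k)
              (alive.erase k) (dirty.discard k)
              ((nd.discard k).union (dep.getD k PySem.Set.empty)) (dels ++ [k]) true
              hcov' hget' hndr' hkeys' hclean' hdep'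
          refine ⟨k :: fired, i1, i2, ?_, ?_, ?_, ?_, i7⟩
          · rw [i3, List.append_assoc]; rfl
          · rw [i4]; simp
          · rw [i5, filterstep]
          · intro x hx
            rcases List.mem_cons.mp hx with rfl | hx
            · exact List.mem_cons_self
            · exact List.mem_cons_of_mem _ (i6 x hx)
    · -- the rule is clean: B skips it; A evaluates it to no effect
      rw [Bool.not_eq_true] at hkd
      have hd1 : PySem.Set.contains dirty k = false := by
        rcases Bool.or_eq_false_iff.mp hkd with ⟨h1, _⟩; exact h1
      have hd2 : PySem.Set.contains nd k = false := by
        rcases Bool.or_eq_false_iff.mp hkd with ⟨_, h2⟩; exact h2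
      have hcondT : (!PySem.Set.contains dirty k && !PySem.Set.contains nd k) = true := by
        rw [hd1, hd2]; rfl
      rw [if_pos hcondT]
      have hfz : fireSideB fixed v = none := hclean (k, v) hkv hkd
      rw [hfz]
      dsimp only
      obtain ⟨fired, i1, i2, i3, i4, i5, i6, i7⟩ :=
        ih fixed implied contra covered alive dirty nd dels added
          hcov (fun p hp => hget p (List.mem_cons_of_mem _ hp)) hndr' hkeys hclean hdep
      exact ⟨fired, i1, i2, i3, i4, i5, fun x hx => List.mem_cons_of_mem _ (i6 x hx), i7⟩

theorem loop_eq (n : Nat) (aliveD : PySem.Dict String (List (List (List (String × Int)))))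
    (fixed implied contra : PySem.Dict String Int) (covered dirty : PySem.Set String)
    (dep : PySem.Dict String (PySem.Set String))
    (hn : aliveD.size ≤ n)
    (hcov : ∀ x, implied.contains x = PySem.Set.contains covered x)
    (hkeys : aliveD.keys.Nodup)
    (hclean : ∀ p ∈ aliveD.items, PySem.Set.contains dirty p.1 = false →
      fireSideB fixed p.2 = none)
    (hdep : ∀ p ∈ aliveD.items, ∀ x ∈ varsOf p.2,
      PySem.Set.contains (dep.getD x PySem.Set.empty) p.1 = true)
    (hdsub : ∀ m, PySem.Set.contains dirty m = true → aliveD.contains m = true) :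
    ∀ t, (ldoiLoop aliveD fixed implied contra).1.contains t
      = PySem.Set.contains (loopB dep fixed covered aliveD dirty) t := by
  induction n generalizing aliveD fixed implied contra covered dirty with
  | zero =>
    intro t
    by_cases hde : dirty.isEmpty = true
    · have hdirtyF : ∀ m, PySem.Set.contains dirty m = false := by
        intro m
        rw [List.isEmpty_iff.mp hde]
        rfl
      have hnone : ∀ p ∈ aliveD.items, firstFire fixed p.2 = none := fun p hp => by
        rw [firstFire_eq_fireSideB]; exact hclean p hp (hdirtyF p.1)
      rw [loopB, if_pos hde, ldoiLoop, passA_noop _ _ _ _ _ _ hnone]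
      rw [dif_neg (by rintro ⟨ha, -, -⟩; cases ha)]
      exact hcov t
    · exfalso
      have hitems : aliveD.items = [] := List.eq_nil_of_length_eq_zero (Nat.le_zero.mp hn)
      cases hdi : dirty with
      | nil => rw [hdi] at hde; exact hde rfl
      | cons m tl =>
        have hm : PySem.Set.contains dirty m = true := by
          rw [hdi]; simp [PySem.Set.contains, List.contains_eq_mem]
        have hc := hdsub m hm
        rw [PySem.Dict.contains_eq_isSome_get?] at hc
        simp [PySem.Dict.get?, hitems] at hc
  | succ n ihn =>
    intro t
    by_cases hde : dirty.isEmpty = true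
    · have hdirtyF : ∀ m, PySem.Set.contains dirty m = false := by
        intro m
        rw [List.isEmpty_iff.mp hde]
        rfl
      have hnone : ∀ p ∈ aliveD.items, firstFire fixed p.2 = none := fun p hp => by
        rw [firstFire_eq_fireSideB]; exact hclean p hp (hdirtyF p.1)
      rw [loopB, if_pos hde, ldoiLoop, passA_noop _ _ _ _ _ _ hnone]
      rw [dif_neg (by rintro ⟨ha, -, -⟩; cases ha)]
      exact hcov t
    · rw [loopB, if_neg hde]
      have hkeyseq : aliveD.keys = aliveD.items.map Prod.fst := rfl
      obtain ⟨fired, h1, h2, h3, h4, h5, h6, h7⟩ :=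
        pass_spec aliveD.items fixed implied contra covered aliveD dirty PySem.Set.empty [] false
          dep hcov
          (fun p hp => PySem.Dict.get?_of_mem_items _ hp hkeys)
          (hkeyseq ▸ hkeys) hkeys
          (fun p hp h0 => hclean p hp (by simpa using h0))
          hdep
      rw [List.nil_append] at h3
      rw [Bool.false_or] at h4
      rw [hkeyseq]
      cases hfi : fired with
      | nil =>
        have hadd : (passA fixed implied contra [] false aliveD.items).2.2.2.2 = false := by
          rw [h4, hfi]; rfl
        have hsz : (passBD dep (aliveD.items.map Prod.fst) fixed covered aliveD dirty
            PySem.Set.empty).2.2.1.size = aliveD.size := by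
          show _root_.List.length _ = _root_.List.length _
          rw [h5, hfi]
          simp
        rw [dif_neg (by rw [hsz]; omega), ldoiLoop, dif_neg (by rintro ⟨ha, -, -⟩; rw [hadd] at ha; cases ha)]
        exact h2 t
      | cons f0 fs =>
        have hadd : (passA fixed implied contra [] false aliveD.items).2.2.2.2 = true := by
          rw [h4, hfi]; rfl
        have hAalive : delFired (passA fixed implied contra [] false aliveD.items).2.2.2.1 aliveD
            = (passBD dep (aliveD.items.map Prod.fst) fixed covered aliveD dirty
                PySem.Set.empty).2.2.1 := by
          apply PySem.Dict.ext
          rw [h3]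
          unfold delFired
          rw [eraseFold_items, h5]
          apply List.filter_congr
          intro e _
          simp [List.contains_eq_mem, PySem.Set.mem_ofList]
        have hlt : (passBD dep (aliveD.items.map Prod.fst) fixed covered aliveD dirty
            PySem.Set.empty).2.2.1.size < aliveD.size := by
          show _root_.List.length _ < _root_.List.length _
          rw [h5]
          rw [List.length_filter_lt_length_iff_exists]
          have hf0 : f0 ∈ aliveD.items.map Prod.fst := h6 f0 (by rw [hfi]; exact List.mem_cons_self)
          obtain ⟨e, he, hef⟩ := List.mem_map.mp hf0
          refine ⟨e, he, ?_⟩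
          simp [List.contains_eq_mem, hef, hfi]
        rw [dif_pos hlt, ldoiLoop, hAalive]
        have hcont' : ∀ p ∈ (passBD dep (aliveD.items.map Prod.fst) fixed covered aliveD dirty
            PySem.Set.empty).2.2.1.items, p ∈ aliveD.items := by
          intro p hp
          rw [h5] at hp
          exact List.mem_of_mem_filter hp
        by_cases hz : (passBD dep (aliveD.items.map Prod.fst) fixed covered aliveD dirty
            PySem.Set.empty).2.2.1.size = 0
        · -- everything fired: the next B round sees an empty dirty set and stops
          rw [dif_neg (by rintro ⟨-, hne, -⟩; exact hne hz)]
          have hit0 : (passBD dep (aliveD.items.map Prod.fst) fixed covered aliveD dirty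
              PySem.Set.empty).2.2.1.items = [] := List.eq_nil_of_length_eq_zero hz
          have hcont0 : ∀ m, (passBD dep (aliveD.items.map Prod.fst) fixed covered aliveD dirty
              PySem.Set.empty).2.2.1.contains m = false := by
            intro m
            rw [PySem.Dict.contains_eq_isSome_get?]
            show (Option.map (fun x => x.2) (List.find? (fun p => p.1 == m)
              (passBD dep (aliveD.items.map Prod.fst) fixed covered aliveD dirty
                PySem.Set.empty).2.2.1.items)).isSome = false
            rw [hit0]
            rfl
          have hfil : (((passBD dep (aliveD.items.map Prod.fst) fixed covered aliveD dirty
              PySem.Set.empty).2.2.2.1.union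
                (passBD dep (aliveD.items.map Prod.fst) fixed covered aliveD dirty
                  PySem.Set.empty).2.2.2.2).filter
              (fun m => (passBD dep (aliveD.items.map Prod.fst) fixed covered aliveD dirty
                  PySem.Set.empty).2.2.1.contains m)) = [] :=
            List.filter_eq_nil_iff.mpr (fun a _ => by rw [hcont0 a]; exact Bool.false_ne_true)
          rw [hfil, loopB]
          rw [if_pos List.isEmpty_nil]
          exact h2 t
        · rw [dif_pos ⟨hadd, hz, hlt⟩]
          rw [h1]
          apply ihn
          · omega
          · exact h2
          · show ((passBD dep (aliveD.items.map Prod.fst) fixed covered aliveD dirty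
                PySem.Set.empty).2.2.1.items.map Prod.fst).Nodup
            rw [h5]
            exact List.Nodup.sublist (List.Sublist.map _ List.filter_sublist) hkeys
          · intro p hp h0
            apply h7 p hp
            have hmemk : (passBD dep (aliveD.items.map Prod.fst) fixed covered aliveD dirty
                PySem.Set.empty).2.2.1.contains p.1 = true :=
              (PySem.Dict.contains_iff_mem_keys _ _).mpr (PySem.Dict.mem_keys_of_mem_items _ hp)
            simp only [PySem.Set.contains, List.contains_eq_mem, List.mem_filter,
              decide_eq_false_iff_not, not_and] at h0
            have hnotu : p.1 ∉ (passBD dep (aliveD.items.map Prod.fst) fixed covered aliveD dirty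
                PySem.Set.empty).2.2.2.1.union
                  (passBD dep (aliveD.items.map Prod.fst) fixed covered aliveD dirty
                    PySem.Set.empty).2.2.2.2 := by
              intro hu
              exact absurd hmemk (by simpa using h0 hu)
            rw [PySem.Set.mem_union] at hnotu
            push_neg at hnotu
            simp only [PySem.Set.contains, List.contains_eq_mem]
            rw [decide_eq_false hnotu.1, decide_eq_false hnotu.2]
            rfl
          · intro p hp x hx
            exact hdep p (hcont' p hp) x hx
          · intro m hm
            simp only [PySem.Set.contains, List.contains_eq_mem, List.mem_filter,
              decide_eq_true_eq] at hm
            exact hm.2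

theorem ofList_items_self {ν : Type} (d : PySem.Dict String ν) (h : d.keys.Nodup) :
    PySem.Dict.ofList d.items = d := by
  apply PySem.Dict.ext
  show (d.items.foldl (fun acc p => acc.insert p.1 p.2) PySem.Dict.empty).items = d.items
  rw [PySem.Dict.items_foldl_insert_fresh d.items Prod.fst Prod.snd PySem.Dict.empty
    (fun a _ => PySem.Dict.contains_empty a.1) h]
  simp [show PySem.Dict.empty.items = ([] : List (String × ν)) from rfl]

theorem single_drivers_spec : Claim_equal_single_drivers := by
  intro partial_state primes _hdom _hpre
  unfold Spec_single_drivers single_drivers single_drivers_alt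
  have hof : PySem.Dict.ofList (PySem.Dict.ofList primes).items = PySem.Dict.ofList primes :=
    ofList_items_self _ (PySem.Dict.nodup_keys_ofList primes)
  have hsing : ∀ (k : String) (val : Int), (PySem.Dict.empty.insert k val).items = [(k, val)] := by
    intro k val
    rfl
  have hdec : ∀ (k : String) (val : Int),
      (PySem.Dict.ofList partial_state).keys.all (fun kk =>
        (logical_domain_of_influence_f (PySem.Dict.empty.insert k val)
          (PySem.Dict.ofList primes)).1.contains kk)
      = (PySem.Dict.ofList partial_state).keys.all (fun kk =>
          PySem.Set.contains
            (loopB (depIndex (PySem.Dict.ofList primes).items) (PySem.Dict.empty.insert k val)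
              PySem.Set.empty (PySem.Dict.ofList (PySem.Dict.ofList primes).items)
              (PySem.Set.ofList (PySem.Dict.ofList (PySem.Dict.ofList primes).items).keys)) kk) := by
    intro k val
    apply congrArg
    funext kk
    unfold logical_domain_of_influence_f
    rw [hof]
    apply loop_eq (PySem.Dict.ofList primes).size _ _ _ _ _ _ _ le_rfl
    · intro x; rfl
    · exact PySem.Dict.nodup_keys_ofList primes
    · intro p hp h0
      exfalso
      have hmem : p.1 ∈ (PySem.Dict.ofList primes).keys := PySem.Dict.mem_keys_of_mem_items _ hp
      rw [show PySem.Set.contains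
          (PySem.Set.ofList (PySem.Dict.ofList primes).keys) p.1 = true by
        simp [PySem.Set.contains, List.contains_eq_mem, PySem.Set.mem_ofList, hmem]] at h0
      cases h0
    · intro p hp x hx
      exact depIndex_sound _ p hp x hx
    · intro m hm
      simp only [PySem.Set.contains, List.contains_eq_mem, PySem.Set.mem_ofList,
        decide_eq_true_eq] at hm
      exact (PySem.Dict.contains_iff_mem_keys _ _).mpr hm
  simp only [hdec, hsing]
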